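-- pv_equiv track=rewrite | github.com/SMT-COMP/smt-comp | tools/prep/make_participants_md.py | get_division_str
-- ===== SOURCE A (Python) =====
-- def get_division_str(divisions_indexed_by_tracks):
--     divisions = {}
--     for track in divisions_indexed_by_tracks:
--         for l in divisions_indexed_by_tracks[track]:
--             if l not in divisions:
--                 divisions[l] = []
--             divisions[l].append(track)
--
--     division_fields = []
--     for l in sorted(divisions):
--         sub_division_fields = "- name: {}\n  tracks:\n{}".format(
--                 l, "\n".join(
--                     map(lambda x: "  - {}".format(x), divisions[l])))
--         division_fields.append(sub_division_fields)
--     division_fields_str = "\n".join(division_fields)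
--     return division_fields_str
-- ===== SOURCE B (Python) =====
-- def get_division_str(divisions_indexed_by_tracks):
--     pairs = [(division, track)
--              for track, divs in divisions_indexed_by_tracks.items()
--              for division in divs]
--     pairs.sort(key=lambda p: p[0])
--     blocks = []
--     i = 0
--     n = len(pairs)
--     while i < n:
--         d = pairs[i][0]
--         lines = []
--         while i < n and pairs[i][0] == d:
--             lines.append("  - " + pairs[i][1])
--             i += 1
--         blocks.append("- name: {}\n  tracks:\n{}".format(d, "\n".join(lines)))
--     return "\n".join(blocks)
-- ===== Notes on version B (the rewrite author's own statement) =====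
-- stated objective: alternative
-- what changed: Replaces the dict inversion plus sorted(keys) pass by flattening to a (division, track) pair list, stably sorting it by the division key, and grouping adjacent equal keys in one scan; no dictionary is built.
import Mathlib
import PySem

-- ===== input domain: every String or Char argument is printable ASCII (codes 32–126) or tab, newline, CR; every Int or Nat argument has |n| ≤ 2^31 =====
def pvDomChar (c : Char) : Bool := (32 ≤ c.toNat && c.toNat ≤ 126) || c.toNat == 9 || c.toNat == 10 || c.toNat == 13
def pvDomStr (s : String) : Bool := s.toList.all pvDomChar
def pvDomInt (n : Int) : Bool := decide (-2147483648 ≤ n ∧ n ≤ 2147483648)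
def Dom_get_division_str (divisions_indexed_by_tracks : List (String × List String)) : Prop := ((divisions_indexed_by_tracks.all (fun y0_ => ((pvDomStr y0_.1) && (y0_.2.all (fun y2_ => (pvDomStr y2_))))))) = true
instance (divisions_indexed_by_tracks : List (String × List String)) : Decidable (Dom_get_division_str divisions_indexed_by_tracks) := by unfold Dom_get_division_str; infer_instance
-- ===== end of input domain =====

-- B replaces the dict inversion + sorted(keys) by stably sorting a flat (division, track) pair
-- list on the division key and grouping adjacent equal keys in one scan (objective: alternative).

-- ===== PORT A =====
-- literal port of A: invert the track→divisions dict into divisions→tracks,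
-- then emit one block per division name in sorted order
def get_division_str (divisions_indexed_by_tracks : List (String × List String)) : String :=
  let divisions : PySem.Dict String (List String) :=
    divisions_indexed_by_tracks.foldl (fun d p =>
      ((PySem.Dict.mk divisions_indexed_by_tracks).getD p.1 []).foldl (fun d l =>
        let d1 := if d.contains l then d else d.insert l []
        d1.modify l [] (fun v => v ++ [p.1])) d) PySem.Dict.empty
  let division_fields : List String :=
    (PySem.List.sorted divisions.keys (fun x => x)).foldl (fun acc l =>
      acc ++ ["- name: " ++ l ++ "\n  tracks:\n" ++
        PySem.Str.join "\n" ((divisions.getD l []).map (fun x => "  - " ++ x))]) []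
  PySem.Str.join "\n" division_fields

-- ===== PORT B =====
-- termination of B's outer while loop: each round consumes at least the current pair
theorem pvBlocksG_term (p : String × String) (rest : List (String × String)) :
    (rest.dropWhile (fun q => q.1 == p.1)).length < (p :: rest).length :=
  Nat.lt_succ_of_le (List.length_dropWhile_le _ rest)

-- B's grouping scan over the key-sorted pair list: the inner while loop collects the
-- run of pairs sharing the current division key (takeWhile), the outer loop resumes
-- after the run (dropWhile)
def pvBlocksG : List (String × String) → List String
  | [] => []
  | p :: rest =>
    ("- name: " ++ p.1 ++ "\n  tracks:\n" ++
      PySem.Str.join "\n" (("  - " ++ p.2) ::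
        (rest.takeWhile (fun q => q.1 == p.1)).map (fun q => "  - " ++ q.2)))
      :: pvBlocksG (rest.dropWhile (fun q => q.1 == p.1))
  termination_by pairs => pairs.length
  decreasing_by exact pvBlocksG_term p rest

def get_division_str_alt (divisions_indexed_by_tracks : List (String × List String)) : String :=
  let pairs := divisions_indexed_by_tracks.flatMap (fun p => p.2.map (fun d => (d, p.1)))
  PySem.Str.join "\n" (pvBlocksG (PySem.List.sorted pairs (fun q => q.1)))

-- ===== PRECONDITION & SPEC =====
-- Pre_ excludes association lists with duplicate track keys: they represent no Python input,
-- since Python collapses duplicate keys when the dict argument is constructed, before A runs.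
def Pre_get_division_str (divisions_indexed_by_tracks : List (String × List String)) : Prop :=
  (divisions_indexed_by_tracks.map Prod.fst).Nodup
instance (divisions_indexed_by_tracks : List (String × List String)) : Decidable (Pre_get_division_str divisions_indexed_by_tracks) := by unfold Pre_get_division_str; infer_instance

def pvWitness_get_division_str : (List (String × List String)) :=
  [("track1", ["DivA", "DivB"]), ("track2", ["DivA"])]

def Spec_get_division_str (divisions_indexed_by_tracks : List (String × List String)) (out : String) : Prop := out = get_division_str_alt divisions_indexed_by_tracks
instance (divisions_indexed_by_tracks : List (String × List String)) (out : String) : Decidable (Spec_get_division_str divisions_indexed_by_tracks out) := by unfold Spec_get_division_str; infer_instance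

-- ===== CLAIM (what is proved, stated in full; the proofs are below) =====
def Claim_equal_get_division_str : Prop := ∀ (divisions_indexed_by_tracks : List (String × List String)), Dom_get_division_str divisions_indexed_by_tracks → Pre_get_division_str divisions_indexed_by_tracks → Spec_get_division_str divisions_indexed_by_tracks (get_division_str divisions_indexed_by_tracks)

-- ===== LEMMAS AND PROOFS =====

-- the block emitted for one division
def pvBlock (m : String) (tracks : List String) : String :=
  "- name: " ++ m ++ "\n  tracks:\n" ++ PySem.Str.join "\n" (tracks.map (fun t => "  - " ++ t))

-- A's inner dict update, as a single step on (division, track) pairs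
def pvStepA (d : PySem.Dict String (List String)) (q : String × String) : PySem.Dict String (List String) :=
  let d1 := if d.contains q.1 then d else d.insert q.1 []
  d1.modify q.1 [] (fun v => v ++ [q.2])

theorem getD_stepA (d : PySem.Dict String (List String)) (q : String × String) (k : String) :
    (pvStepA d q).getD k [] = if k = q.1 then d.getD q.1 [] ++ [q.2] else d.getD k [] := by
  unfold pvStepA PySem.Dict.modify
  by_cases h : d.contains q.1 = true
  · simp [h, PySem.Dict.getD_insert]
  · simp only [Bool.not_eq_true] at h
    have hg : d.getD q.1 [] = [] := by
      have := PySem.Dict.contains_eq_isSome_get? d q.1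
      rw [h] at this
      cases hx : d.get? q.1 with
      | none => simp [PySem.Dict.getD, hx]
      | some v => rw [hx] at this; simp at this
    simp only [h, Bool.false_eq_true, if_false, PySem.Dict.getD_insert, hg, List.nil_append]
    split_ifs <;> rfl

theorem getD_foldl_stepA (qs : List (String × String)) (d : PySem.Dict String (List String)) (k : String) :
    (qs.foldl pvStepA d).getD k [] = d.getD k [] ++ (qs.filter (fun q => q.1 == k)).map Prod.snd := by
  induction qs generalizing d with
  | nil => simp
  | cons q qs ih =>
    simp only [List.foldl_cons, ih, getD_stepA, List.filter_cons]
    by_cases h : k = q.1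
    · subst h; simp [List.append_assoc]
    · have h' : ¬ q.1 = k := fun hx => h hx.symm
      simp [h, h']

theorem keys_stepA (d : PySem.Dict String (List String)) (q : String × String) :
    (pvStepA d q).keys = PySem.Set.add d.keys q.1 := by
  unfold pvStepA
  rw [PySem.Dict.keys_modify]
  by_cases h : d.contains q.1 = true
  · have hm : q.1 ∈ d.keys := (PySem.Dict.contains_iff_mem_keys d q.1).1 h
    rw [if_pos h, PySem.Dict.keys_insert_of_contains _ _ h]
    simp [PySem.Set.add, PySem.Set.contains, List.contains_iff_mem, hm]
  · simp only [Bool.not_eq_true] at h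
    have hm : q.1 ∉ d.keys := fun hc => by
      simp [(PySem.Dict.contains_iff_mem_keys d q.1).2 hc] at h
    rw [if_neg (by simp [h])]
    rw [PySem.Dict.keys_insert_of_contains _ _ (by simp [PySem.Dict.contains_insert_self])]
    rw [PySem.Dict.keys_insert_of_not_contains _ _ h]
    simp [PySem.Set.add, PySem.Set.contains, List.contains_iff_mem, hm]

theorem keys_foldl_stepA (qs : List (String × String)) (d : PySem.Dict String (List String)) :
    (qs.foldl pvStepA d).keys = PySem.Set.update d.keys (qs.map Prod.fst) := by
  induction qs generalizing d with
  | nil => simp [PySem.Set.update]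
  | cons q qs ih => simp [List.foldl_cons, ih, keys_stepA, PySem.Set.update]

theorem map_fst_filter (m : String) (l : List (String × String)) :
    ((l.filter (fun q => !(q.1 == m))).map Prod.fst) = (l.map Prod.fst).filter (fun k => !(k == m)) := by
  induction l with
  | nil => rfl
  | cons x xs ih => by_cases h : x.1 = m <;> simp [List.filter_cons, h, ih]

-- the sorted distinct keys of a key list start with a minimal key
theorem sorted_ofList_min_cons (ks : List String) (m : String)
    (hmem : m ∈ ks) (hle : ∀ y ∈ ks, m ≤ y) :
    PySem.List.sorted (PySem.Set.ofList ks) (fun x => x)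
      = m :: PySem.List.sorted (PySem.Set.ofList (ks.filter (fun k => !(k == m)))) (fun x => x) := by
  apply PySem.List.sorted_eq_of_perm_of_pairwise_lt
  · -- permutation with ofList ks
    have hnd₁ : (m :: PySem.List.sorted (PySem.Set.ofList (ks.filter (fun k => !(k == m)))) (fun x => x)).Nodup := by
      refine List.nodup_cons.2 ⟨?_, ?_⟩
      · intro hc
        have : m ∈ ks.filter (fun k => !(k == m)) :=
          (PySem.Set.mem_ofList _ _).1 ((PySem.List.mem_sorted _ _ _ _).1 hc)
        simp [List.mem_filter] at this
      · exact ((PySem.List.sorted_perm _ _ _).nodup_iff).2 (PySem.Set.nodup_ofList _)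
    refine (List.perm_ext_iff_of_nodup hnd₁ (PySem.Set.nodup_ofList _)).2 ?_
    intro a
    simp only [List.mem_cons, PySem.List.mem_sorted, PySem.Set.mem_ofList, List.mem_filter]
    constructor
    · rintro (rfl | ⟨ha, _⟩)
      · exact hmem
      · exact ha
    · intro ha
      by_cases h : a = m
      · exact Or.inl h
      · exact Or.inr ⟨ha, by simp [h]⟩
  · -- strictly increasing
    refine List.pairwise_cons.2 ⟨?_, ?_⟩
    · intro b hb
      have hbm : b ∈ ks.filter (fun k => !(k == m)) :=
        (PySem.Set.mem_ofList _ _).1 ((PySem.List.mem_sorted _ _ _ _).1 hb)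
      simp only [List.mem_filter, Bool.not_eq_eq_eq_not, Bool.not_true, beq_eq_false_iff_ne] at hbm
      exact lt_of_le_of_ne (hle b hbm.1) (Ne.symm hbm.2)
    · exact PySem.List.sorted_ofList_pairwise_lt _

-- STABILITY of Python's sort: filtering one key class commutes with sorting by that key
theorem pairwise_insertBy (x : String × String) (acc : List (String × String))
    (h : acc.Pairwise (fun a b => a.1 ≤ b.1)) :
    (PySem.List.insertBy (fun a b => decide (a.1 < b.1)) x acc).Pairwise (fun a b => a.1 ≤ b.1) := by
  induction acc with
  | nil => simp [PySem.List.insertBy]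
  | cons y ys ih =>
    obtain ⟨hy, hys⟩ := List.pairwise_cons.1 h
    simp only [PySem.List.insertBy]
    by_cases hb : x.1 < y.1
    · simp only [hb, decide_true, if_true]
      refine List.pairwise_cons.2 ⟨?_, h⟩
      intro z hz
      rcases List.mem_cons.1 hz with rfl | hz'
      · exact le_of_lt hb
      · exact le_trans (le_of_lt hb) (hy z hz')
    · simp only [hb, decide_false, if_false]
      refine List.pairwise_cons.2 ⟨?_, ih hys⟩
      intro z hz
      rcases (PySem.List.mem_insertBy _ _ _ _).1 hz with rfl | hz'
      · exact not_lt.1 hb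
      · exact hy z hz'

theorem filter_insertBy (k : String) (x : String × String) (acc : List (String × String))
    (h : acc.Pairwise (fun a b => a.1 ≤ b.1)) :
    (PySem.List.insertBy (fun a b => decide (a.1 < b.1)) x acc).filter (fun q => q.1 == k)
      = if x.1 = k then acc.filter (fun q => q.1 == k) ++ [x]
        else acc.filter (fun q => q.1 == k) := by
  induction acc with
  | nil =>
    by_cases hk : x.1 = k <;> simp [PySem.List.insertBy, hk]
  | cons y ys ih =>
    obtain ⟨hy, hys⟩ := List.pairwise_cons.1 h
    simp only [PySem.List.insertBy]
    by_cases hb : x.1 < y.1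
    · simp only [hb, decide_true, if_true]
      by_cases hk : x.1 = k
      · have hnil : (y :: ys).filter (fun q => q.1 == k) = [] := by
          refine List.filter_eq_nil_iff.2 ?_
          intro z hz hzk
          have hzy : y.1 ≤ z.1 := by
            rcases List.mem_cons.1 hz with rfl | hz'
            · exact le_refl _
            · exact hy z hz'
          have : z.1 = k := by simpa using hzk
          exact absurd (lt_of_lt_of_le (hk ▸ hb) hzy) (by simp [this])
        simp [List.filter_cons, hk, hnil]
      · simp [List.filter_cons, hk]
    · simp only [hb, decide_false, Bool.false_eq_true, if_false, List.filter_cons, ih hys]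
      by_cases hk : x.1 = k <;> by_cases hyk : y.1 = k <;> simp [hk, hyk]
    
theorem filter_foldl_insertBy (k : String) :
    ∀ (xs acc : List (String × String)), acc.Pairwise (fun a b => a.1 ≤ b.1) →
    (xs.foldl (fun acc x => PySem.List.insertBy (fun a b => decide (a.1 < b.1)) x acc) acc).filter
        (fun q => q.1 == k)
      = acc.filter (fun q => q.1 == k) ++ xs.filter (fun q => q.1 == k) := by
  intro xs
  induction xs with
  | nil => intro acc _; simp
  | cons x xs ih =>
    intro acc h
    rw [List.foldl_cons, ih _ (pairwise_insertBy x acc h), filter_insertBy k x acc h,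
      List.filter_cons]
    by_cases hk : x.1 = k <;> simp [hk]

theorem filter_sorted (pairs : List (String × String)) (k : String) :
    (PySem.List.sorted pairs (fun q => q.1)).filter (fun q => q.1 == k)
      = pairs.filter (fun q => q.1 == k) := by
  rw [PySem.List.sorted_eq_foldl_insertBy]
  simpa using filter_foldl_insertBy k pairs [] (by simp)

-- on a key-sorted list, the first run of the head key is its whole key class
theorem tw_dw_eq_filter (d : String) (sp : List (String × String))
    (hpw : sp.Pairwise (fun a b => a.1 ≤ b.1)) (hge : ∀ y ∈ sp, d ≤ y.1) :
    sp.takeWhile (fun q => q.1 == d) = sp.filter (fun q => q.1 == d)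
    ∧ sp.dropWhile (fun q => q.1 == d) = sp.filter (fun q => !(q.1 == d)) := by
  induction sp with
  | nil => exact ⟨rfl, rfl⟩
  | cons y ys ih =>
    obtain ⟨hy, hys⟩ := List.pairwise_cons.1 hpw
    by_cases h : y.1 = d
    · have hge' : ∀ z ∈ ys, d ≤ z.1 := fun z hz => h ▸ hy z hz
      obtain ⟨h1, h2⟩ := ih hys hge'
      refine ⟨?_, ?_⟩
      · simp [List.takeWhile_cons, List.filter_cons, h, h1]
      · simp [List.dropWhile_cons, List.filter_cons, h, h2]
    · have hlt : d < y.1 := lt_of_le_of_ne (hge y (by simp)) (fun e => h e.symm)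
      have hnone : ∀ z ∈ y :: ys, ¬ (z.1 = d) := by
        intro z hz e
        rcases List.mem_cons.1 hz with rfl | hz'
        · exact h e
        · exact absurd (e ▸ hy z hz') (not_le.2 hlt)
      refine ⟨?_, ?_⟩
      · rw [List.takeWhile_cons, if_neg (by simp [h])]
        exact (List.filter_eq_nil_iff.2 (by intro z hz; simpa using hnone z hz)).symm
      · rw [List.dropWhile_cons, if_neg (by simp [h])]
        exact (List.filter_eq_self.2 (by intro z hz; simpa using hnone z hz)).symm

-- B's grouping scan produces one block per distinct division, in sorted order
theorem blocksG_eq (sp : List (String × String)) (hpw : sp.Pairwise (fun a b => a.1 ≤ b.1)) :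
    pvBlocksG sp = (PySem.List.sorted (PySem.Set.ofList (sp.map Prod.fst)) (fun x => x)).map
      (fun l => pvBlock l ((sp.filter (fun q => q.1 == l)).map Prod.snd)) := by
  induction hn : sp.length using Nat.strong_induction_on generalizing sp with
  | _ n ih =>
    cases sp with
    | nil => simp [pvBlocksG, PySem.Set.ofList, PySem.List.sorted]
    | cons p rest =>
      obtain ⟨hy, hys⟩ := List.pairwise_cons.1 hpw
      have hmem : p.1 ∈ (p :: rest).map Prod.fst := by simp
      have hle : ∀ y ∈ (p :: rest).map Prod.fst, p.1 ≤ y := by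
        intro y hy'
        rcases List.mem_map.1 hy' with ⟨q, hq, rfl⟩
        rcases List.mem_cons.1 hq with rfl | hq'
        · exact le_refl _
        · exact hy q hq'
      obtain ⟨htw, hdw⟩ := tw_dw_eq_filter p.1 rest hys (fun z hz => hy z hz)
      rw [pvBlocksG, sorted_ofList_min_cons _ p.1 hmem hle, List.map_cons]
      congr 1
      · -- the head block
        rw [htw]
        simp [pvBlock, List.filter_cons, List.map_map, Function.comp_def]
      · -- the remaining blocks
        rw [hdw]
        have hlen : (rest.filter (fun q => !(q.1 == p.1))).length < n := by
          rw [← hn]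
          exact Nat.lt_succ_of_le (List.length_filter_le _ _)
        rw [ih _ hlen _ (hys.filter _) rfl]
        have hkeys : ((rest.filter (fun q => !(q.1 == p.1))).map Prod.fst)
            = ((p :: rest).map Prod.fst).filter (fun k => !(k == p.1)) := by
          rw [map_fst_filter, List.map_cons, List.filter_cons]
          simp
        rw [hkeys]
        apply List.map_congr_left
        intro l hl
        have hlm : l ≠ p.1 := by
          have := (PySem.Set.mem_ofList _ _).1 ((PySem.List.mem_sorted _ _ _ _).1 hl)
          simp only [List.mem_filter, Bool.not_eq_eq_eq_not, Bool.not_true, beq_eq_false_iff_ne] at this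
          exact this.2
        rw [List.filter_filter]
        refine congrArg (fun ts => pvBlock l (List.map Prod.snd ts)) ?_
        rw [List.filter_cons, if_neg (by simp only [beq_iff_eq]; exact fun e => hlm e.symm)]
        apply List.filter_congr
        intro q _
        by_cases h : q.1 = l <;> simp [h, hlm]

-- folding "append one block" is mapping
theorem foldl_append_singleton {α β : Type} (f : α → β) (xs : List α) (acc : List β) :
    xs.foldl (fun acc l => acc ++ [f l]) acc = acc ++ xs.map f := by
  induction xs generalizing acc with
  | nil => simp
  | cons x xs ih => simp [List.foldl_cons, ih]

-- ===== VERDICT (by name: the statement is the Claim_ definition above) =====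
theorem get_division_str_spec : Claim_equal_get_division_str := by
  intro inp _ hpre
  unfold Spec_get_division_str get_division_str get_division_str_alt
  dsimp only
  have hkeys : (PySem.Dict.mk inp).keys.Nodup := hpre
  -- replace the dict lookup by the pair's own value (keys are unique)
  have hlook : ∀ (d : PySem.Dict String (List String)), ∀ p ∈ inp,
      ((PySem.Dict.mk inp).getD p.1 []).foldl (fun d l =>
        let d1 := if d.contains l then d else d.insert l []
        d1.modify l [] (fun v => v ++ [p.1])) d
      = (p.2.map (fun dv => (dv, p.1))).foldl pvStepA d := by
    intro d p hp
    have : (PySem.Dict.mk inp).getD p.1 [] = p.2 := by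
      rcases p with ⟨t, ds⟩
      exact PySem.Dict.getD_of_mem_items _ hp hkeys []
    rw [this, List.foldl_map]
    rfl
  rw [PySem.List.foldl_congr_mem inp _ _ _ hlook, ← List.foldl_flatMap]
  set pairs := inp.flatMap (fun p => p.2.map (fun dv => (dv, p.1))) with hpairs
  have hks : (pairs.foldl pvStepA PySem.Dict.empty).keys = PySem.Set.ofList (pairs.map Prod.fst) := by
    rw [keys_foldl_stepA]
    exact PySem.Set.update_nil_left _
  rw [hks, foldl_append_singleton
    (fun l => "- name: " ++ l ++ "\n  tracks:\n" ++
      PySem.Str.join "\n" (((pairs.foldl pvStepA PySem.Dict.empty).getD l []).map (fun x => "  - " ++ x)))]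
  rw [blocksG_eq _ (PySem.List.sorted_pairwise pairs (fun q => q.1))]
  simp only [List.nil_append]
  have hperm : ((PySem.List.sorted pairs (fun q => q.1)).map Prod.fst).Perm (pairs.map Prod.fst) :=
    (PySem.List.sorted_perm pairs (fun q => q.1) false).map Prod.fst
  have hofl : PySem.List.sorted (PySem.Set.ofList ((PySem.List.sorted pairs (fun q => q.1)).map Prod.fst)) (fun x => x)
      = PySem.List.sorted (PySem.Set.ofList (pairs.map Prod.fst)) (fun x => x) := by
    apply PySem.List.sorted_eq_sorted_of_perm _ _ _ (fun a b h => h)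
    refine (List.perm_ext_iff_of_nodup (PySem.Set.nodup_ofList _) (PySem.Set.nodup_ofList _)).2 ?_
    intro a
    rw [PySem.Set.mem_ofList, PySem.Set.mem_ofList, hperm.mem_iff]
  rw [hofl]
  congr 1
  apply List.map_congr_left
  intro l _
  rw [getD_foldl_stepA, filter_sorted]
  simp [pvBlock, List.map_map, Function.comp_def]
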